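-- pv_equiv track=rewrite | github.com/sombr/advent-of-code | 2015/day19/part1.py | compute_replacement
-- ===== SOURCE A (Python) =====
-- def compute_replacement(subs, string):
--     res = set()
--
--     for s, ts in subs.items():
--         parts = string.split(s)
--         if len(parts) == 1:
--             continue # not found
--
--         endpos = len(parts)
--         for pos in range(1, endpos):
--             for t in ts:
--                 newstr = parts.copy()
--                 for ipos in range(endpos-1, 0, -1):
--                     newstr.insert(ipos, t if pos == ipos else s)
--                 res.add( "".join(newstr) )
--
--     return res
-- ===== SOURCE B (Python) =====
-- def compute_replacement(subs, string):
--     # Scan occurrence offsets with str.find and build each result by direct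
--     # slicing, instead of splitting and re-joining with an insert loop.
--     res = set()
--     for s, ts in subs.items():
--         start = 0
--         while True:
--             j = string.find(s, start)
--             if j == -1:
--                 break
--             for t in ts:
--                 res.add(string[:j] + t + string[j + len(s):])
--             start = j + len(s)
--     return res
-- ===== Notes on version B (the rewrite author's own statement) =====
-- stated objective: faster
-- what changed: B scans each pattern's occurrence offsets with str.find and builds every result by two direct string slices, instead of splitting the string into parts and rebuilding each result with a quadratic reverse insert loop before joining.
-- outside the precondition, e.g. on compute_replacement({'': ['X']}, 'ab'): A raises ValueError, B does not finish within the time limit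
import Mathlib
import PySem

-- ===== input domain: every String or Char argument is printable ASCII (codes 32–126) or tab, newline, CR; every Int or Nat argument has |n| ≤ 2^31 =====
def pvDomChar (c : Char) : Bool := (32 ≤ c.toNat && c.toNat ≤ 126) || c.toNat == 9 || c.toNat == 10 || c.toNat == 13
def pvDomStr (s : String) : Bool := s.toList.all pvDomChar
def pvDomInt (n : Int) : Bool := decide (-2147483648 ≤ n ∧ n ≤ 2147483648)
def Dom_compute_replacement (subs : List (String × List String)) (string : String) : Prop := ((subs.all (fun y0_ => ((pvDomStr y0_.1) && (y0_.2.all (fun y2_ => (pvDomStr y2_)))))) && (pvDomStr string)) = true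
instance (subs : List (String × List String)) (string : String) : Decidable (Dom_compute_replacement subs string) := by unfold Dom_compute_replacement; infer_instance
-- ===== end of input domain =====

-- B replaces A's split-then-rebuild-by-reverse-inserts construction with a find-offset
-- scan that builds each result by two direct slices (objective: faster, measured).

-- ===== PORT A =====
def compute_replacement (subs : List (String × List String)) (string : String) : List String :=
  (PySem.Dict.ofList subs).items.foldl (fun res sts =>
    match PySem.Str.split? string sts.1 with
    | none => res   -- Python raises ValueError here (separator = ""); excluded by Pre_
    | some parts =>
      if parts.length = 1 then res   -- 'continue': not found
      else
        let endpos : Int := parts.length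
        (PySem.List.pyRange 1 endpos 1).foldl (fun res pos =>
          sts.2.foldl (fun res t =>
            PySem.Set.add res (PySem.Str.join ""
              (((PySem.List.pyRange (endpos - 1) 0 (-1)).foldl
                (fun acc ipos => PySem.List.insert acc ipos (if pos = ipos then t else sts.1)) parts)))) res) res)
    PySem.Set.empty

-- ===== PORT B =====
-- the 'while True' loop of Source B; the fuel (|string|+1) only makes the recursion total,
-- it is never exhausted when the separator is nonempty
def crAltLoop (string s : String) (ts : List String) : Nat → Int → PySem.Set String → PySem.Set String
  | 0, _, res => res
  | fuel+1, start, res =>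
    let j := PySem.Str.findFrom string s start
    if j = -1 then res
    else
      crAltLoop string s ts fuel (j + PySem.Str.len s)
        (ts.foldl (fun r t => PySem.Set.add r
          (PySem.Str.slice string none (some j) ++ t ++ PySem.Str.slice string (some (j + PySem.Str.len s)) none)) res)

def compute_replacement_alt (subs : List (String × List String)) (string : String) : List String :=
  (PySem.Dict.ofList subs).items.foldl (fun res sts =>
    crAltLoop string sts.1 sts.2 (string.toList.length + 1) 0 res) PySem.Set.empty

-- ===== PRECONDITION & SPEC =====
-- Pre_ excludes an empty replacement key: there Python A raises ValueError (str.split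
-- with an empty separator) and Python B does not terminate.
def Pre_compute_replacement (subs : List (String × List String)) (string : String) : Prop :=
  ∀ p ∈ subs, p.1 ≠ ""
instance (subs : List (String × List String)) (string : String) : Decidable (Pre_compute_replacement subs string) := by unfold Pre_compute_replacement; infer_instance

def pvWitness_compute_replacement : (List (String × List String)) × String := ([("ab", ["X", "Y"]), ("c", ["Z"])], "cabab")

def Spec_compute_replacement (subs : List (String × List String)) (string : String) (out : List String) : Prop := out = compute_replacement_alt subs string
instance (subs : List (String × List String)) (string : String) (out : List String) : Decidable (Spec_compute_replacement subs string out) := by unfold Spec_compute_replacement; infer_instance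

-- ===== CLAIM (what is proved, stated in full; the proofs are below) =====
def Claim_equal_compute_replacement : Prop := ∀ (subs : List (String × List String)) (string : String), Dom_compute_replacement subs string → Pre_compute_replacement subs string → Spec_compute_replacement subs string (compute_replacement subs string)

-- ===== LEMMAS AND PROOFS =====

lemma pvFindGo_shift (sub : List Char) : ∀ (l : List Char) (k : Nat),
    PySem.Chars.find.go sub l k =
      if PySem.Chars.find.go sub l 0 = -1 then -1 else PySem.Chars.find.go sub l 0 + k := by
  intro l
  induction l with
  | nil =>
    intro k
    by_cases h : sub.isEmpty <;> simp [PySem.Chars.find.go, h]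
  | cons c rest ih =>
    intro k
    by_cases h : sub.isPrefixOf (c :: rest)
    · simp [PySem.Chars.find.go, h]
    · simp only [PySem.Chars.find.go, h, if_false]
      rw [ih (k+1), ih 1]
      have h3 := (PySem.Chars.find_nonneg_iff rest sub).2
      have h4 := (PySem.Chars.find_ne_neg_one_iff rest sub).1
      by_cases h2 : PySem.Chars.find.go sub rest 0 = -1
      · simp [h2]
      · have h5 : (0:Int) ≤ PySem.Chars.find.go sub rest 0 := by
          simpa [PySem.Chars.find] using h3 (by simpa [PySem.Chars.find] using h4 (by simpa [PySem.Chars.find] using h2))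
        simp only [h2, if_false]
        split_ifs <;> push_cast <;> omega

lemma pvFind_nil' (sub : List Char) (h : sub ≠ []) : PySem.Chars.find [] sub = -1 := by
  simp [PySem.Chars.find, PySem.Chars.find.go, List.isEmpty_iff, h]

lemma pvFind_cons_prefix (sub l : List Char) (c : Char) (h : sub.isPrefixOf (c :: l)) :
    PySem.Chars.find (c :: l) sub = 0 := by
  simp [PySem.Chars.find, PySem.Chars.find.go, h]

lemma pvFind_cons_not_prefix (sub l : List Char) (c : Char) (h : ¬ sub.isPrefixOf (c :: l)) :
    PySem.Chars.find (c :: l) sub =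
      if PySem.Chars.find l sub = -1 then -1 else PySem.Chars.find l sub + 1 := by
  simp only [PySem.Chars.find, PySem.Chars.find.go, h, if_false]
  exact pvFindGo_shift sub l 1

lemma pvFind_decomp (sl cs : List Char) (h : 0 ≤ PySem.Chars.find cs sl) :
    cs = cs.take (PySem.Chars.find cs sl).toNat ++ sl ++
         cs.drop ((PySem.Chars.find cs sl).toNat + sl.length) ∧
    (PySem.Chars.find cs sl).toNat + sl.length ≤ cs.length := by
  obtain ⟨pref, hp⟩ := (PySem.Chars.find_spec h).1
  have hkle : (PySem.Chars.find cs sl).toNat ≤ cs.length := by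
    have := PySem.Chars.find_le_length cs sl; omega
  have hdrop : cs.drop (PySem.Chars.find cs sl).toNat = sl ++ pref := hp.symm
  have hlen : (PySem.Chars.find cs sl).toNat + sl.length ≤ cs.length := by
    have := congrArg List.length hdrop
    simp only [List.length_drop, List.length_append] at this
    omega
  refine ⟨?_, hlen⟩
  have h2 : cs.drop ((PySem.Chars.find cs sl).toNat + sl.length) = pref := by
    have h3 := congrArg (List.drop sl.length) hdrop
    rw [List.drop_drop, List.drop_left] at h3
    simpa [Nat.add_comm] using h3
  rw [h2]
  conv_lhs => rw [← List.take_append_drop (PySem.Chars.find cs sl).toNat cs]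
  rw [hdrop, List.append_assoc]

def splitRec (sl cs : List Char) : List (List Char) :=
  if h : PySem.Chars.find cs sl < 0 ∨ sl = [] then [cs]
  else
    cs.take (PySem.Chars.find cs sl).toNat ::
      splitRec sl (cs.drop ((PySem.Chars.find cs sl).toNat + sl.length))
termination_by cs.length
decreasing_by
  rcases not_or.mp h with ⟨h1, h2⟩
  have h0 : 0 ≤ PySem.Chars.find cs sl := le_of_not_gt h1
  have := (pvFind_decomp sl cs h0).2
  have hsl : 0 < sl.length := List.length_pos_of_ne_nil h2
  simp only [List.length_drop]
  omega

lemma pvSplitRec_ne_nil (sl cs : List Char) : splitRec sl cs ≠ [] := by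
  rw [splitRec]
  split <;> simp

def pvConsHead (c : List Char) : List (List Char) → List (List Char)
  | [] => [c]
  | p :: ps => (c ++ p) :: ps

lemma pvSplitRec_cons (sl : List Char) (c : Char) (l : List Char) (hsl : sl ≠ [])
    (h : ¬ sl.isPrefixOf (c :: l)) :
    splitRec sl (c :: l) = pvConsHead [c] (splitRec sl l) := by
  have hf := pvFind_cons_not_prefix sl l c h
  by_cases h1 : PySem.Chars.find l sl = -1
  · have hc : PySem.Chars.find (c :: l) sl = -1 := by rw [hf]; simp [h1]
    rw [splitRec, dif_pos (by left; omega)]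
    conv_rhs => rw [splitRec]
    rw [dif_pos (by left; omega)]
    simp [pvConsHead]
  · have h0 : (0:Int) ≤ PySem.Chars.find l sl := by
      have := (PySem.Chars.find_nonneg_iff l sl).2 ((PySem.Chars.find_ne_neg_one_iff l sl).1 h1)
      exact this
    have hc : PySem.Chars.find (c :: l) sl = PySem.Chars.find l sl + 1 := by rw [hf]; simp [h1]
    rw [splitRec, dif_neg (by push_neg; exact ⟨by omega, hsl⟩)]
    conv_rhs => rw [splitRec]
    rw [dif_neg (by push_neg; exact ⟨by omega, hsl⟩)]
    have ht : (PySem.Chars.find (c :: l) sl).toNat = (PySem.Chars.find l sl).toNat + 1 := by omega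
    simp only [pvConsHead, ht, List.take_succ_cons, List.singleton_append]
    rw [show (PySem.Chars.find l sl).toNat + 1 + sl.length = ((PySem.Chars.find l sl).toNat + sl.length) + 1 from by omega]
    simp [List.drop_succ_cons]

lemma pvConsHead_nil_left (xs : List (List Char)) (h : xs ≠ []) : pvConsHead [] xs = xs := by
  cases xs with
  | nil => exact absurd rfl h
  | cons p ps => simp [pvConsHead]

lemma pvConsHead_assoc (x y : List Char) (xs : List (List Char)) :
    pvConsHead (x ++ y) xs = pvConsHead x (pvConsHead y xs) := by
  cases xs <;> simp [pvConsHead]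

lemma pvSplitOn_go_eq (sl : List Char) (hsl : sl ≠ []) :
    ∀ (fuel : Nat) (cs cur : List Char) (acc : List (List Char)), cs.length < fuel →
      PySem.Chars.splitOn.go sl fuel cs cur acc =
        acc.reverse ++ pvConsHead cur.reverse (splitRec sl cs) := by
  intro fuel
  induction fuel with
  | zero => intro cs cur acc h; omega
  | succ fuel ih =>
    intro cs cur acc h
    cases cs with
    | nil =>
      rw [splitRec, dif_pos (by left; rw [pvFind_nil' sl hsl]; omega)]
      simp [PySem.Chars.splitOn.go, pvConsHead]
    | cons c l =>
      by_cases hp : sl.isPrefixOf (c :: l)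
      · have hsl1 : 1 ≤ sl.length := List.length_pos_of_ne_nil hsl
        have hgo : PySem.Chars.splitOn.go sl (fuel+1) (c :: l) cur acc =
            PySem.Chars.splitOn.go sl fuel (List.drop sl.length (c :: l)) [] (cur.reverse :: acc) := by
          simp [PySem.Chars.splitOn.go, hp]
        rw [hgo, ih _ [] _ (by simp at h ⊢; omega)]
        have hf := pvFind_cons_prefix sl l c hp
        simp only [List.reverse_cons, List.reverse_nil]
        rw [pvConsHead_nil_left _ (pvSplitRec_ne_nil sl _)]
        conv_rhs => rw [splitRec]
        rw [dif_neg (by push_neg; exact ⟨by omega, hsl⟩)]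
        simp [pvConsHead, hf]
      · have hgo : PySem.Chars.splitOn.go sl (fuel+1) (c :: l) cur acc =
            PySem.Chars.splitOn.go sl fuel l (c :: cur) acc := by
          simp [PySem.Chars.splitOn.go, hp]
        rw [hgo, ih _ _ _ (by simp at h; omega)]
        rw [pvSplitRec_cons sl c l hsl hp]
        have : (c :: cur).reverse = cur.reverse ++ [c] := by simp
        rw [this, pvConsHead_assoc]

lemma pvSplitOn_eq_splitRec (sl cs : List Char) (hsl : sl ≠ []) :
    PySem.Chars.splitOn cs sl = splitRec sl cs := by
  rw [PySem.Chars.splitOn, pvSplitOn_go_eq sl hsl _ _ _ _ (by omega)]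
  simp [pvConsHead_nil_left _ (pvSplitRec_ne_nil _ _)]

lemma pvJoin_splitRec (sl : List Char) (hsl : sl ≠ []) :
    ∀ cs, PySem.Chars.join sl (splitRec sl cs) = cs := by
  intro cs
  induction hcs : cs.length using Nat.strong_induction_on generalizing cs with
  | _ n ihn =>
  subst hcs
  by_cases h : PySem.Chars.find cs sl < 0 ∨ sl = []
  · rw [splitRec, dif_pos h, PySem.Chars.join_singleton]
  · rw [splitRec, dif_neg h]
    rcases not_or.mp h with ⟨h1, _⟩
    have h0 : 0 ≤ PySem.Chars.find cs sl := le_of_not_gt h1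
    obtain ⟨hdec, hle⟩ := pvFind_decomp sl cs h0
    have hlt : (cs.drop ((PySem.Chars.find cs sl).toNat + sl.length)).length < cs.length := by
      have hsl1 : 1 ≤ sl.length := List.length_pos_of_ne_nil hsl
      have hcs0 : 0 < cs.length := by
        by_contra hc
        have : cs = [] := List.eq_nil_of_length_eq_zero (by omega)
        subst this
        rw [pvFind_nil' sl hsl] at h0; omega
      simp only [List.length_drop]; omega
    have hrec := ihn _ hlt _ rfl
    obtain ⟨p, ps, hps⟩ : ∃ p ps, splitRec sl (cs.drop ((PySem.Chars.find cs sl).toNat + sl.length)) = p :: ps := by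
      rcases hx : splitRec sl (cs.drop ((PySem.Chars.find cs sl).toNat + sl.length)) with _ | ⟨p, ps⟩
      · exact absurd hx (pvSplitRec_ne_nil _ _)
      · exact ⟨p, ps, rfl⟩
    rw [hps, PySem.Chars.join_cons_cons, ← hps, hrec]
    conv_rhs => rw [hdec]

def occScan (sl cs : List Char) : List (List Char × List Char) :=
  if h : PySem.Chars.find cs sl < 0 ∨ sl = [] then []
  else
    (cs.take (PySem.Chars.find cs sl).toNat,
     cs.drop ((PySem.Chars.find cs sl).toNat + sl.length)) ::
      (occScan sl (cs.drop ((PySem.Chars.find cs sl).toNat + sl.length))).map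
        (fun pq => (cs.take (PySem.Chars.find cs sl).toNat ++ sl ++ pq.1, pq.2))
termination_by cs.length
decreasing_by
  rcases not_or.mp h with ⟨h1, h2⟩
  have h0 : 0 ≤ PySem.Chars.find cs sl := le_of_not_gt h1
  have := (pvFind_decomp sl cs h0).2
  have hsl : 0 < sl.length := List.length_pos_of_ne_nil h2
  simp only [List.length_drop]
  omega

def occParts (sl : List Char) (parts : List (List Char)) : List (List Char × List Char) :=
  (List.range (parts.length - 1)).map
    (fun i => (PySem.Chars.join sl (parts.take (i+1)), PySem.Chars.join sl (parts.drop (i+1))))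

lemma pvOccMain (sl : List Char) (hsl : sl ≠ []) :
    ∀ cs, occParts sl (splitRec sl cs) = occScan sl cs := by
  intro cs
  induction hn : cs.length using Nat.strong_induction_on generalizing cs with
  | _ n ihn =>
  subst hn
  by_cases h : PySem.Chars.find cs sl < 0 ∨ sl = []
  · rw [splitRec, dif_pos h, occScan, dif_pos h]
    simp [occParts]
  · rw [splitRec, dif_neg h, occScan, dif_neg h]
    rcases not_or.mp h with ⟨h1, _⟩
    have h0 : 0 ≤ PySem.Chars.find cs sl := le_of_not_gt h1
    obtain ⟨hdec, hle⟩ := pvFind_decomp sl cs h0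
    have hsl1 : 1 ≤ sl.length := List.length_pos_of_ne_nil hsl
    have hcs0 : 0 < cs.length := by
      by_contra hc
      have : cs = [] := List.eq_nil_of_length_eq_zero (by omega)
      subst this
      rw [pvFind_nil' sl hsl] at h0; omega
    have hlt : (cs.drop ((PySem.Chars.find cs sl).toNat + sl.length)).length < cs.length := by
      simp only [List.length_drop]; omega
    have hIH := ihn _ hlt _ rfl
    have hjoin := pvJoin_splitRec sl hsl (cs.drop ((PySem.Chars.find cs sl).toNat + sl.length))
    obtain ⟨p, ps, hps⟩ : ∃ p ps, splitRec sl (cs.drop ((PySem.Chars.find cs sl).toNat + sl.length)) = p :: ps := by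
      rcases hx : splitRec sl (cs.drop ((PySem.Chars.find cs sl).toNat + sl.length)) with _ | ⟨p, ps⟩
      · exact absurd hx (pvSplitRec_ne_nil _ _)
      · exact ⟨p, ps, rfl⟩
    rw [hps] at hIH hjoin ⊢
    show occParts sl (cs.take (PySem.Chars.find cs sl).toNat :: p :: ps) = _
    have hlen : (cs.take (PySem.Chars.find cs sl).toNat :: p :: ps).length - 1 = ps.length + 1 := by simp
    rw [occParts, hlen, List.range_succ_eq_map, List.map_cons, List.map_map]
    congr 1
    · simp only [List.take_succ_cons, List.take_zero, List.drop_succ_cons, List.drop_zero]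
      rw [PySem.Chars.join_singleton, hjoin]
    · rw [← hIH, occParts]
      simp only [List.length_cons, Nat.add_sub_cancel, List.map_map]
      apply List.map_congr_left
      intro i hi
      simp [List.take_succ_cons, List.drop_succ_cons, PySem.Chars.join_cons_cons]

def iweave {α : Type} (sep : Int → α) : Int → List α → List α
  | _, [] => []
  | _, [x] => [x]
  | i, x :: y :: xs => x :: sep i :: iweave sep (i+1) (y :: xs)

lemma pvIweave_append {α : Type} (sep : Int → α) (y : α) :
    ∀ (xs : List α) (i : Int), xs ≠ [] →
      iweave sep i (xs ++ [y]) = iweave sep i xs ++ [sep (i + xs.length - 1), y] := by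
  intro xs
  induction xs with
  | nil => intro i h; exact absurd rfl h
  | cons x rest ih =>
    intro i _
    cases rest with
    | nil => simp [iweave]
    | cons z zs =>
      have := ih (i+1) (by simp)
      simp only [List.cons_append, iweave] at this ⊢
      rw [this]
      simp only [List.length_cons]
      push_cast
      ring_nf

lemma pvFoldInsert {α : Type} (sep : Int → α) :
    ∀ (m : Nat) (l : List α), m < l.length →
      (PySem.List.pyRange (m : Int) 0 (-1)).foldl
          (fun acc ipos => PySem.List.insert acc ipos (sep ipos)) l
        = iweave sep 1 (l.take (m+1)) ++ l.drop (m+1) := by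
  intro m
  induction m with
  | zero =>
    intro l hl
    rw [PySem.List.pyRange_neg_one_eq_nil (by omega)]
    cases l with
    | nil => simp at hl
    | cons x xs => simp [iweave]
  | succ m ih =>
    intro l hl
    rw [show ((m+1 : Nat) : Int) = ((m:Int) + 1) from by push_cast; ring]
    rw [PySem.List.pyRange_neg_one_cons (by omega)]
    rw [show ((m:Int) + 1 - 1) = (m : Int) from by ring]
    simp only [List.foldl_cons]
    have hins : PySem.List.insert l ((m:Int)+1) (sep ((m:Int)+1)) =
        l.take (m+1) ++ sep ((m:Int)+1) :: l.drop (m+1) := by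
      rw [show ((m:Int)+1) = ((m+1 : Nat) : Int) from by push_cast; ring]
      exact PySem.List.insert_natCast l (m+1) _ (by omega)
    rw [hins, ih _ (by simp; omega)]
    have htake : (l.take (m+1) ++ sep ((m:Int)+1) :: l.drop (m+1)).take (m+1) = l.take (m+1) := by
      rw [List.take_append_of_le_length (by simp; omega)]
      simp
    have hdrop : (l.take (m+1) ++ sep ((m:Int)+1) :: l.drop (m+1)).drop (m+1) =
        sep ((m:Int)+1) :: l.drop (m+1) := by
      rw [List.drop_append_of_le_length (by simp; omega)]
      simp [List.length_take, Nat.min_eq_left (by omega : m+1 ≤ l.length)]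
    rw [htake, hdrop]
    obtain ⟨a, ha⟩ : ∃ a, l[m+1]? = some a := ⟨l[m+1]'hl, List.getElem?_eq_getElem hl⟩
    have htk : l.take (m+2) = l.take (m+1) ++ [a] := by
      rw [List.take_succ, ha]
      simp
    have ha2 : l[m+1]'hl = a := by
      have h5 := List.getElem?_eq_getElem hl
      rw [h5] at ha
      exact Option.some.inj ha
    have hdr : l.drop (m+1) = a :: l.drop (m+2) := by
      rw [List.drop_eq_getElem_cons hl, ha2]
    rw [htk, hdr]
    rw [pvIweave_append sep a _ 1 (by
      apply List.ne_nil_of_length_pos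
      simp [List.length_take]
      omega)]
    simp only [List.length_take, Nat.min_eq_left (by omega : m+1 ≤ l.length)]
    rw [show ((1:Int) + (m+1 : Nat) - 1) = ((m:Int)+1) from by push_cast; ring]
    simp

lemma pvIweave_congr {α : Type} (sep sep' : Int → α) :
    ∀ (xs : List α) (i : Int), (∀ j, i ≤ j → j < i + xs.length - 1 → sep j = sep' j) →
      iweave sep i xs = iweave sep' i xs := by
  intro xs
  induction xs with
  | nil => intro i _; rfl
  | cons x rest ih =>
    intro i hj
    cases rest with
    | nil => rfl
    | cons z zs =>
      simp only [iweave]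
      rw [hj i le_rfl (by simp; omega), ih (i+1) (fun j h1 h2 => hj j (by omega) (by simp at h2 ⊢; omega))]

lemma pvIweave_const (s : List Char) :
    ∀ (xs : List (List Char)) (i : Int), (iweave (fun _ => s) i xs).flatten = PySem.Chars.join s xs := by
  intro xs
  induction xs with
  | nil => intro i; simp [iweave, PySem.Chars.join_nil]
  | cons x rest ih =>
    intro i
    cases rest with
    | nil => simp [iweave, PySem.Chars.join_singleton]
    | cons z zs =>
      simp only [iweave, List.flatten_cons, PySem.Chars.join_cons_cons, ih (i+1)]
      simp [List.append_assoc]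

lemma pvIweave_split {α : Type} (sep : Int → α) :
    ∀ (u v : List α) (i : Int), u ≠ [] → v ≠ [] →
      iweave sep i (u ++ v) = iweave sep i u ++ sep (i + u.length - 1) :: iweave sep (i + u.length) v := by
  intro u
  induction u with
  | nil => intro v i h; exact absurd rfl h
  | cons x rest ih =>
    intro v i _ hv
    cases rest with
    | nil =>
      obtain ⟨z, zs, rfl⟩ : ∃ z zs, v = z :: zs := by
        cases v with
        | nil => exact absurd rfl hv
        | cons z zs => exact ⟨z, zs, rfl⟩
      simp [iweave]
    | cons z zs =>
      have := ih v (i+1) (by simp) hv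
      simp only [List.cons_append, iweave] at this ⊢
      rw [this]
      simp only [List.length_cons, List.cons_append]
      push_cast
      ring_nf

lemma pvIweave_map {α β : Type} (f : α → β) (sep : Int → α) :
    ∀ (xs : List α) (i : Int), (iweave sep i xs).map f = iweave (fun j => f (sep j)) i (xs.map f) := by
  intro xs
  induction xs with
  | nil => intro i; rfl
  | cons x rest ih =>
    intro i
    cases rest with
    | nil => rfl
    | cons z zs => simp [iweave, ih (i+1)]

lemma pvJoin_nil_flatten : ∀ (l : List (List Char)), PySem.Chars.join [] l = l.flatten := by
  intro l
  induction l with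
  | nil => simp [PySem.Chars.join_nil]
  | cons x rest ih =>
    cases rest with
    | nil => simp [PySem.Chars.join_singleton]
    | cons z zs => simp [PySem.Chars.join_cons_cons, ih]

lemma pvAStr (sl tl : List Char) (parts : List (List Char)) (pos : Nat)
    (h1 : 1 ≤ pos) (h2 : pos < parts.length) :
    (iweave (fun i => if (pos : Int) = i then tl else sl) 1 parts).flatten
      = PySem.Chars.join sl (parts.take pos) ++ tl ++ PySem.Chars.join sl (parts.drop pos) := by
  have hu : parts.take pos ≠ [] := by
    apply List.ne_nil_of_length_pos
    simp [List.length_take]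
    omega
  have hv : parts.drop pos ≠ [] := by
    apply List.ne_nil_of_length_pos
    simp [List.length_drop]
    omega
  conv_lhs => rw [← List.take_append_drop pos parts]
  rw [pvIweave_split _ _ _ 1 hu hv]
  simp only [List.length_take, Nat.min_eq_left (Nat.le_of_lt h2)]
  rw [pvIweave_congr _ (fun _ => sl) (parts.take pos) 1 (by
    intro j hj1 hj2
    simp only [List.length_take, Nat.min_eq_left (Nat.le_of_lt h2)] at hj2
    rw [if_neg (by omega)])]
  rw [pvIweave_congr _ (fun _ => sl) (parts.drop pos) (1 + (pos:Int)) (by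
    intro j hj1 hj2
    rw [if_neg (by omega)])]
  rw [show ((1:Int) + (pos:Nat) - 1) = ((pos:Nat):Int) from by ring, if_pos rfl]
  rw [List.flatten_append, List.flatten_cons, pvIweave_const, pvIweave_const]
  simp [List.append_assoc]

def addAll (res : PySem.Set String) (l : List String) : PySem.Set String :=
  l.foldl PySem.Set.add res

lemma pvAddAll_append (res : PySem.Set String) (x y : List String) :
    addAll res (x ++ y) = addAll (addAll res x) y := by
  simp [addAll, List.foldl_append]

lemma pvAddAll_map (res : PySem.Set String) {β : Type} (g : β → String) (ts : List β) :
    ts.foldl (fun r t => PySem.Set.add r (g t)) res = addAll res (ts.map g) := by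
  rw [addAll, List.foldl_map]

lemma pvFoldl_addAll {β : Type} (f : β → List String) (l : List β) (res : PySem.Set String) :
    l.foldl (fun r x => addAll r (f x)) res = addAll res (l.flatMap f) := by
  induction l generalizing res with
  | nil => simp [addAll]
  | cons x xs ih => simp [List.flatMap_cons, pvAddAll_append, ih]

def emitPairs (ts : List String) (pairs : List (List Char × List Char)) : List String :=
  pairs.flatMap (fun pq => ts.map (fun t => String.ofList (pq.1 ++ t.toList ++ pq.2)))

lemma pvStr_inj (a b : String) (h : a.toList = b.toList) : a = b := by
  have := congrArg String.ofList h
  simpa using this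

lemma pvStr_toList_ne (s : String) (hs : s ≠ "") : s.toList ≠ [] := by
  intro h
  apply hs
  have := congrArg String.ofList h
  simpa using this

lemma pvItemA (s : String) (ts : List String) (string : String) (res : PySem.Set String)
    (hs : s ≠ "") :
    (match PySem.Str.split? string s with
      | none => res
      | some parts =>
        if parts.length = 1 then res
        else
          let endpos : Int := parts.length
          (PySem.List.pyRange 1 endpos 1).foldl (fun res pos =>
            ts.foldl (fun res t =>
              PySem.Set.add res (PySem.Str.join ""
                (((PySem.List.pyRange (endpos - 1) 0 (-1)).foldl
                  (fun acc ipos => PySem.List.insert acc ipos (if pos = ipos then t else s)) parts)))) res) res)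
      = addAll res (emitPairs ts (occParts s.toList (splitRec s.toList string.toList))) := by
  have hsl : s.toList ≠ [] := pvStr_toList_ne s hs
  have hsplit : PySem.Str.split? string s = some ((splitRec s.toList string.toList).map String.ofList) := by
    rw [PySem.Str.split?, PySem.Chars.split?]
    simp [List.isEmpty_iff, hsl, pvSplitOn_eq_splitRec _ _ hsl]
  rw [hsplit]
  dsimp only
  have hne := pvSplitRec_ne_nil s.toList string.toList
  by_cases hlen : ((splitRec s.toList string.toList).map String.ofList).length = 1
  · show (if ((splitRec s.toList string.toList).map String.ofList).length = 1 then res else _) = _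
    rw [if_pos hlen]
    simp only [List.length_map] at hlen
    simp [emitPairs, occParts, hlen, addAll]
  · show (if ((splitRec s.toList string.toList).map String.ofList).length = 1 then res else _) = _
    rw [if_neg hlen]
    simp only [List.length_map] at hlen
    have hn0 : (splitRec s.toList string.toList).length ≠ 0 := by
      simpa [List.length_eq_zero_iff] using hne
    have hlen2 : 2 ≤ (splitRec s.toList string.toList).length := by omega
    simp only [List.length_map]
    rw [PySem.List.pyRange_one]
    rw [show (((splitRec s.toList string.toList).length : Int) - 1).toNat
        = (splitRec s.toList string.toList).length - 1 from by omega]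
    rw [List.foldl_map]
    simp only [pvAddAll_map]
    rw [pvFoldl_addAll]
    congr 1
    rw [emitPairs, occParts]
    rw [List.flatMap_def, List.flatMap_def, List.map_map]
    congr 1
    apply List.map_congr_left
    intro k hk
    simp only [List.mem_range] at hk
    simp only [Function.comp_apply]
    apply List.map_congr_left
    intro t _
    apply pvStr_inj
    rw [PySem.Str.toList_join]
    rw [show (((splitRec s.toList string.toList).length : Int) - 1)
        = (((splitRec s.toList string.toList).length - 1 : Nat) : Int) from by omega]
    rw [pvFoldInsert _ ((splitRec s.toList string.toList).length - 1)
        ((splitRec s.toList string.toList).map String.ofList) (by simp; omega)]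
    rw [show (splitRec s.toList string.toList).length - 1 + 1
        = (splitRec s.toList string.toList).length from by omega]
    rw [List.take_of_length_le (by simp), List.drop_of_length_le (by simp), List.append_nil]
    rw [pvIweave_map String.toList]
    have hmap : ((splitRec s.toList string.toList).map String.ofList).map String.toList
        = splitRec s.toList string.toList := by
      rw [List.map_map]
      have hco : (String.toList ∘ String.ofList) = (fun cs : List Char => cs) := by
        funext cs
        simp
      rw [hco, List.map_id']
    rw [hmap]
    have hsep : (fun j => (if (1:Int) + (k:Int) = j then t else s).toList)
        = (fun j => if (((k+1 : Nat)):Int) = j then t.toList else s.toList) := by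
      funext j
      rw [apply_ite String.toList]
      congr 1
      simp only [eq_iff_iff]
      constructor <;> intro h <;> omega
    rw [show ("" : String).toList = [] from rfl]
    rw [pvJoin_nil_flatten]
    rw [hsep]
    rw [pvAStr s.toList t.toList _ (k+1) (by omega) (by omega)]
    simp

lemma pvItemB (s : String) (ts : List String) (string : String) (hs : s ≠ "") :
    ∀ (fuel k : Nat) (res : PySem.Set String), k ≤ string.toList.length →
      string.toList.length - k < fuel →
      crAltLoop string s ts fuel (k : Int) res
        = addAll res (emitPairs ts ((occScan s.toList (string.toList.drop k)).map
            (fun pq => (string.toList.take k ++ pq.1, pq.2)))) := by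
  have hsl : s.toList ≠ [] := pvStr_toList_ne s hs
  have hsl1 : 1 ≤ s.toList.length := List.length_pos_of_ne_nil hsl
  intro fuel
  induction fuel with
  | zero => intro k res h1 h2; omega
  | succ fuel ih =>
    intro k res hk hfuel
    have hff : PySem.Str.findFrom string s (k : Int) =
        (if PySem.Chars.find (string.toList.drop k) s.toList = -1 then -1
         else (k : Int) + PySem.Chars.find (string.toList.drop k) s.toList) := by
      rw [PySem.Str.findFrom_eq, PySem.Chars.findFrom_natCast _ _ k hk]
    by_cases hf : PySem.Chars.find (string.toList.drop k) s.toList = -1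
    · show (if PySem.Str.findFrom string s (k : Int) = -1 then res else _) = _
      rw [hff, if_pos hf, if_pos rfl]
      rw [occScan, dif_pos (by left; rw [hf]; omega)]
      simp [emitPairs, addAll]
    · have h0 : (0:Int) ≤ PySem.Chars.find (string.toList.drop k) s.toList :=
        (PySem.Chars.find_nonneg_iff _ _).2 ((PySem.Chars.find_ne_neg_one_iff _ _).1 hf)
      obtain ⟨hdec, hle⟩ := pvFind_decomp s.toList (string.toList.drop k) h0
      have hlek : (PySem.Chars.find (string.toList.drop k) s.toList).toNat + s.toList.length
          ≤ string.toList.length - k := by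
        simpa [List.length_drop] using hle
      show (if PySem.Str.findFrom string s (k : Int) = -1 then res else _) = _
      rw [hff, if_neg hf, if_neg (by omega)]
      have hcast : ((k : Int) + PySem.Chars.find (string.toList.drop k) s.toList + PySem.Str.len s)
          = (((k + (PySem.Chars.find (string.toList.drop k) s.toList).toNat + s.toList.length : Nat)) : Int) := by
        rw [PySem.Str.len_eq]
        push_cast
        omega
      rw [hcast]
      rw [ih (k + (PySem.Chars.find (string.toList.drop k) s.toList).toNat + s.toList.length) _
          (by omega) (by omega)]
      simp only [pvAddAll_map]
      rw [← pvAddAll_append]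
      congr 1
      conv_rhs => rw [occScan, dif_neg (by push_neg; exact ⟨by omega, hsl⟩)]
      rw [List.map_cons]
      simp only [emitPairs]
      rw [List.flatMap_cons]
      congr 1
      · -- the batch of this occurrence
        apply List.map_congr_left
        intro t _
        apply pvStr_inj
        simp only [String.toList_append, PySem.Str.toList_slice]
        simp only [PySem.Chars.slice]
        rw [PySem.List.slice_to _ (by omega)]
        rw [PySem.List.slice_from _ (by omega)]
        rw [show ((k : Int) + PySem.Chars.find (string.toList.drop k) s.toList).toNat
            = k + (PySem.Chars.find (string.toList.drop k) s.toList).toNat from by omega]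
        rw [Int.toNat_natCast]
        rw [List.take_add]
        simp only [String.toList_ofList]
        rw [show (k + (PySem.Chars.find (string.toList.drop k) s.toList).toNat) + s.toList.length
            = ((PySem.Chars.find (string.toList.drop k) s.toList).toNat + s.toList.length) + k from by omega]
        rw [← List.drop_drop]
        simp [List.append_assoc]
        omega
      · -- the remaining occurrences
        rw [List.map_map]
        have hdd : (string.toList.drop k).drop ((PySem.Chars.find (string.toList.drop k) s.toList).toNat + s.toList.length)
            = string.toList.drop (k + (PySem.Chars.find (string.toList.drop k) s.toList).toNat + s.toList.length) := by
          rw [List.drop_drop]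
          congr 1
          omega
        rw [hdd]
        congr 1
        apply List.map_congr_left
        intro pq _
        simp only [Function.comp_apply]
        congr 1
        obtain ⟨C, hC⟩ := (PySem.Chars.find_spec h0).1
        have htk : string.toList.take (k + (PySem.Chars.find (string.toList.drop k) s.toList).toNat + s.toList.length)
            = string.toList.take k ++ ((string.toList.drop k).take (PySem.Chars.find (string.toList.drop k) s.toList).toNat ++ s.toList) := by
          rw [show k + (PySem.Chars.find (string.toList.drop k) s.toList).toNat + s.toList.length
              = k + ((PySem.Chars.find (string.toList.drop k) s.toList).toNat + s.toList.length) from by omega]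
          rw [List.take_add]
          congr 1
          rw [List.take_add]
          congr 1
          rw [← hC]
          exact List.take_left
        rw [htk]
        simp [List.append_assoc]

lemma pvKeys_ofList (subs : List (String × List String)) :
    (PySem.Dict.ofList subs).keys = PySem.Set.ofList (subs.map Prod.fst) := by
  have h := PySem.Dict.keys_foldl_insert_key subs Prod.fst (fun _ x => x.2) PySem.Dict.empty
  have h2 : PySem.Dict.ofList subs
      = subs.foldl (fun d x => d.insert (Prod.fst x) x.2) PySem.Dict.empty := rfl
  rw [h2, h]
  have h3 : (PySem.Dict.empty : PySem.Dict String (List String)).keys = [] := rfl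
  rw [h3, PySem.Set.update_nil_left]

lemma pvItem_eq (s : String) (ts : List String) (string : String) (res : PySem.Set String)
    (hs : s ≠ "") :
    (match PySem.Str.split? string s with
      | none => res
      | some parts =>
        if parts.length = 1 then res
        else
          let endpos : Int := parts.length
          (PySem.List.pyRange 1 endpos 1).foldl (fun res pos =>
            ts.foldl (fun res t =>
              PySem.Set.add res (PySem.Str.join ""
                (((PySem.List.pyRange (endpos - 1) 0 (-1)).foldl
                  (fun acc ipos => PySem.List.insert acc ipos (if pos = ipos then t else s)) parts)))) res) res)
      = crAltLoop string s ts (string.toList.length + 1) 0 res := by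
  rw [pvItemA s ts string res hs]
  rw [show ((0:Int)) = ((0 : Nat) : Int) from rfl]
  rw [pvItemB s ts string hs (string.toList.length + 1) 0 res (by omega) (by omega)]
  rw [pvOccMain s.toList (pvStr_toList_ne s hs) string.toList]
  congr 1
  simp

-- ===== VERDICT (by name: the statement is the Claim_ definition above) =====
theorem compute_replacement_spec : Claim_equal_compute_replacement := by
  intro subs string _ hpre
  unfold Spec_compute_replacement compute_replacement compute_replacement_alt
  apply PySem.List.foldl_congr_mem
  intro res sts hmem
  have hkey : sts.1 ≠ "" := by
    have h1 := PySem.Dict.mem_keys_of_mem_items _ hmem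
    rw [pvKeys_ofList] at h1
    have h3 : sts.1 ∈ subs.map Prod.fst := (PySem.Set.mem_ofList _ _).1 h1
    obtain ⟨p, hp, hp2⟩ := List.mem_map.mp h3
    exact hp2 ▸ hpre p hp
  exact pvItem_eq sts.1 sts.2 string res hkey
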